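-- pv_equiv track=rewrite | github.com/LibertyLutherMoffitt/ago | src/AgoSemanticChecker.py | can_cast
-- ===== SOURCE A (Python) =====
-- NUMERIC_TYPES = {"int", "float"}
--
-- LIST_TYPES = {"int_list", "float_list", "bool_list", "string_list", "list_any"}
--
-- def get_element_type(list_type: str) -> str:
--     """Get the element type of a list type."""
--     if list_type == "list_any":
--         return "Any"
--     if list_type == "Any":
--         return "Any"  # Indexing Any returns Any
--     if list_type.endswith("_list"):
--         return list_type[:-5]  # Remove "_list" suffix
--     return "unknown"
--
-- def can_cast(from_type: str, to_type: str) -> bool: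
--     """
--     Check if explicit cast via variable name ending is allowed.
--     This is more permissive than is_type_compatible since the user
--     is explicitly requesting a cast by using a different name ending.
--     Based on Rust runtime casting rules in casting.rs.
--     """
--     if from_type == to_type:
--         return True
--     # Any type can be cast to/from anything
--     if from_type == "Any" or to_type == "Any":
--         return True
--     if from_type == "unknown" or to_type == "unknown":
--         return True
--     # list_any elements are Any, so list_any is compatible with specific lists
--     if from_type == "list_any" and to_type in LIST_TYPES:
--         return True
--     if from_type in LIST_TYPES and to_type == "list_any":
--         return True
--     # Numeric types can cast between each other (int, float)
--     if from_type in NUMERIC_TYPES and to_type in NUMERIC_TYPES: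
--         return True
--     # Bool can cast to/from numeric (bool->int: 0/1, int->bool: !=0)
--     if from_type == "bool" and to_type in NUMERIC_TYPES:
--         return True
--     if from_type in NUMERIC_TYPES and to_type == "bool":
--         return True
--     # Anything can cast to string (stringify)
--     if to_type == "string":
--         return True
--     # String can cast to numeric (parsing), bool (non-empty check), or string_list (chars)
--     if from_type == "string" and to_type in NUMERIC_TYPES:
--         return True
--     if from_type == "string" and to_type == "bool":
--         return True
--     if from_type == "string" and to_type == "string_list":
--         return True
--     # Range can cast to int_list, bool, or string
--     if from_type == "range" and to_type in ("int_list", "bool", "string"):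
--         return True
--     # Lists can cast to int (length), bool (non-empty), string, or range
--     if from_type in LIST_TYPES and to_type in ("int", "bool", "string", "range"):
--         return True
--     # Struct can cast to bool (non-empty) or string
--     if from_type == "struct" and to_type in ("bool", "string"):
--         return True
--     # List types can cast between each other if elements can cast
--     if from_type in LIST_TYPES and to_type in LIST_TYPES:
--         from_elem = get_element_type(from_type)
--         to_elem = get_element_type(to_type)
--         return can_cast(from_elem, to_elem)
--     return False
-- ===== SOURCE B (Python) =====
-- # guards + one static table lookup instead of a branch cascade
-- TYPE_CAST_PAIRS = frozenset([
--     ("int", "float"), ("int", "bool"),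
--     ("float", "int"), ("float", "bool"),
--     ("bool", "int"), ("bool", "float"),
--     ("string", "int"), ("string", "float"), ("string", "bool"), ("string", "string_list"),
--     ("int_list", "int"), ("int_list", "bool"), ("int_list", "range"),
--     ("int_list", "float_list"), ("int_list", "bool_list"), ("int_list", "string_list"), ("int_list", "list_any"),
--     ("float_list", "int"), ("float_list", "bool"), ("float_list", "range"),
--     ("float_list", "int_list"), ("float_list", "bool_list"), ("float_list", "string_list"), ("float_list", "list_any"),
--     ("bool_list", "int"), ("bool_list", "bool"), ("bool_list", "range"),
--     ("bool_list", "int_list"), ("bool_list", "float_list"), ("bool_list", "string_list"), ("bool_list", "list_any"),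
--     ("string_list", "int"), ("string_list", "bool"), ("string_list", "range"),
--     ("string_list", "int_list"), ("string_list", "float_list"), ("string_list", "bool_list"), ("string_list", "list_any"),
--     ("list_any", "int"), ("list_any", "bool"), ("list_any", "range"),
--     ("list_any", "int_list"), ("list_any", "float_list"), ("list_any", "bool_list"), ("list_any", "string_list"),
--     ("range", "bool"), ("range", "int_list"),
--     ("struct", "bool"),
-- ])
--
-- def can_cast(from_type: str, to_type: str) -> bool:
--     if from_type == to_type:
--         return True
--     if from_type in ("Any", "unknown") or to_type in ("Any", "unknown"):
--         return True
--     # anything stringifies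
--     if to_type == "string":
--         return True
--     return (from_type, to_type) in TYPE_CAST_PAIRS
-- ===== Notes on version B (the rewrite author's own statement) =====
-- stated objective: idiomatic
-- what changed: Replaced the long branch cascade (with its element-type recursion for list-to-list casts) by three generic guards (equal types, Any/unknown, stringify) followed by a single membership test in a static table of all allowed (from,to) type pairs.
import Mathlib
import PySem

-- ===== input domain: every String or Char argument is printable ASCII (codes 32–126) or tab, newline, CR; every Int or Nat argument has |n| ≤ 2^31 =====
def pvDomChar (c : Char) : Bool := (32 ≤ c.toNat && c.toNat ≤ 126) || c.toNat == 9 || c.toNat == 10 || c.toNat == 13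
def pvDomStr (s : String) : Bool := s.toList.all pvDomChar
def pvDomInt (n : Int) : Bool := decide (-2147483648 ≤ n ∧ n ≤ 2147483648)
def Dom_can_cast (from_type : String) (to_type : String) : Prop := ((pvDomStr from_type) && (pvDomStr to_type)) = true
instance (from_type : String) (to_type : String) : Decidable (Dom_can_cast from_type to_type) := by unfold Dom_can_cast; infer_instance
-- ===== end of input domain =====

-- B replaces A's long branch cascade by three generic guards plus one lookup in a static table of allowed (from,to) pairs (objective: idiomatic/simpler; same cost).


-- ===== PORT A =====
def NUMERIC_TYPES : List String := ["int", "float"]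

def LIST_TYPES : List String := ["int_list", "float_list", "bool_list", "string_list", "list_any"]

def get_element_type (list_type : String) : String :=
  if list_type = "list_any" then "Any"
  else if list_type = "Any" then "Any"
  else if PySem.Str.endswith list_type "_list" then PySem.Str.slice list_type none (some (-5))
  else "unknown"

-- the recursive call only happens with from_type ∈ LIST_TYPES, whose element type is a strictly shorter string
theorem get_element_type_len_lt (s : String) (h : s ∈ LIST_TYPES) :
    (get_element_type s).length < s.length := by
  fin_cases h <;> decide

def can_cast (from_type : String) (to_type : String) : Bool :=
  if from_type = to_type then true
  else if from_type = "Any" ∨ to_type = "Any" then true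
  else if from_type = "unknown" ∨ to_type = "unknown" then true
  else if from_type = "list_any" ∧ to_type ∈ LIST_TYPES then true
  else if from_type ∈ LIST_TYPES ∧ to_type = "list_any" then true
  else if from_type ∈ NUMERIC_TYPES ∧ to_type ∈ NUMERIC_TYPES then true
  else if from_type = "bool" ∧ to_type ∈ NUMERIC_TYPES then true
  else if from_type ∈ NUMERIC_TYPES ∧ to_type = "bool" then true
  else if to_type = "string" then true
  else if from_type = "string" ∧ to_type ∈ NUMERIC_TYPES then true
  else if from_type = "string" ∧ to_type = "bool" then true
  else if from_type = "string" ∧ to_type = "string_list" then true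
  else if from_type = "range" ∧ to_type ∈ ["int_list", "bool", "string"] then true
  else if from_type ∈ LIST_TYPES ∧ to_type ∈ ["int", "bool", "string", "range"] then true
  else if from_type = "struct" ∧ to_type ∈ ["bool", "string"] then true
  else if h : from_type ∈ LIST_TYPES ∧ to_type ∈ LIST_TYPES then
    can_cast (get_element_type from_type) (get_element_type to_type)
  else false
termination_by from_type.length
decreasing_by exact get_element_type_len_lt from_type h.1

-- ===== PORT B =====
def TYPE_CAST_PAIRS : List (String × String) := [
  ("int", "float"), ("int", "bool"),
  ("float", "int"), ("float", "bool"),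
  ("bool", "int"), ("bool", "float"),
  ("string", "int"), ("string", "float"), ("string", "bool"), ("string", "string_list"),
  ("int_list", "int"), ("int_list", "bool"), ("int_list", "range"),
  ("int_list", "float_list"), ("int_list", "bool_list"), ("int_list", "string_list"), ("int_list", "list_any"),
  ("float_list", "int"), ("float_list", "bool"), ("float_list", "range"),
  ("float_list", "int_list"), ("float_list", "bool_list"), ("float_list", "string_list"), ("float_list", "list_any"),
  ("bool_list", "int"), ("bool_list", "bool"), ("bool_list", "range"),
  ("bool_list", "int_list"), ("bool_list", "float_list"), ("bool_list", "string_list"), ("bool_list", "list_any"),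
  ("string_list", "int"), ("string_list", "bool"), ("string_list", "range"),
  ("string_list", "int_list"), ("string_list", "float_list"), ("string_list", "bool_list"), ("string_list", "list_any"),
  ("list_any", "int"), ("list_any", "bool"), ("list_any", "range"),
  ("list_any", "int_list"), ("list_any", "float_list"), ("list_any", "bool_list"), ("list_any", "string_list"),
  ("range", "bool"), ("range", "int_list"),
  ("struct", "bool")]

def can_cast_alt (from_type : String) (to_type : String) : Bool :=
  if from_type = to_type then true
  else if from_type ∈ ["Any", "unknown"] ∨ to_type ∈ ["Any", "unknown"] then true
  else if to_type = "string" then true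
  else (from_type, to_type) ∈ TYPE_CAST_PAIRS

-- ===== PRECONDITION & SPEC =====
def Spec_can_cast (from_type : String) (to_type : String) (out : Bool) : Prop := out = can_cast_alt from_type to_type
instance (from_type : String) (to_type : String) (out : Bool) : Decidable (Spec_can_cast from_type to_type out) := by unfold Spec_can_cast; infer_instance

-- ===== CLAIM (what is proved, stated in full; the proofs are below) =====
def Claim_equal_can_cast : Prop := ∀ (from_type : String) (to_type : String), Dom_can_cast from_type to_type → Spec_can_cast from_type to_type (can_cast from_type to_type)

-- ===== LEMMAS AND PROOFS =====

-- the finite universe of type tokens either program ever tests for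
def pvU : List String := ["Any", "unknown", "int", "float", "bool", "string", "int_list",
  "float_list", "bool_list", "string_list", "list_any", "range", "struct"]

theorem pv_main (f t : String) : can_cast f t = can_cast_alt f t := by
  by_cases hf : f ∈ pvU
  · by_cases ht : t ∈ pvU
    · simp only [pvU] at hf ht
      fin_cases hf <;> fin_cases ht <;>
        (rw [can_cast.eq_def]; (try rw [can_cast.eq_def]); decide)
    · -- t is no known token: every branch keyed on t fails, to_type = "string" included
      simp only [pvU, List.mem_cons, List.not_mem_nil, or_false] at ht
      push_neg at ht
      obtain ⟨t1, t2, t3, t4, t5, t6, t7, t8, t9, t10, t11, t12, t13⟩ := ht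
      simp only [pvU] at hf
      fin_cases hf <;>
        (rw [can_cast.eq_def]; (try rw [can_cast.eq_def]);
         simp [can_cast_alt, TYPE_CAST_PAIRS, LIST_TYPES, NUMERIC_TYPES,
               t1, t2, t3, t4, t5, t6, t7, t8, t9, t10, t11, t12, t13,
               Ne.symm t1, Ne.symm t2, Ne.symm t3, Ne.symm t4, Ne.symm t5, Ne.symm t6,
               Ne.symm t7, Ne.symm t8, Ne.symm t9, Ne.symm t10, Ne.symm t11, Ne.symm t12,
               Ne.symm t13])
  · -- f is no known token
    simp only [pvU, List.mem_cons, List.not_mem_nil, or_false] at hf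
    push_neg at hf
    obtain ⟨f1, f2, f3, f4, f5, f6, f7, f8, f9, f10, f11, f12, f13⟩ := hf
    by_cases hft : f = t
    · subst hft; rw [can_cast.eq_def]; simp [can_cast_alt]
    · by_cases h1 : t = "Any"
      · subst h1; rw [can_cast.eq_def]; simp [can_cast_alt, hft]
      · by_cases h2 : t = "unknown"
        · subst h2; rw [can_cast.eq_def]; simp [can_cast_alt, hft, f1]
        · by_cases h3 : t = "string"
          · subst h3; rw [can_cast.eq_def]
            simp [can_cast_alt, hft, f1, f2, f3, f4, f5, f6, f7, f8, f9, f10, f11, f12, f13]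
          · rw [can_cast.eq_def]
            simp [can_cast_alt, TYPE_CAST_PAIRS, LIST_TYPES, NUMERIC_TYPES, hft,
                  f1, f2, f3, f4, f5, f6, f7, f8, f9, f10, f11, f12, f13, h1, h2, h3]

-- ===== VERDICT (by name: the statement is the Claim_ definition above) =====
theorem can_cast_spec : Claim_equal_can_cast := by
  intro f t _
  exact pv_main f t
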